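-- pv_equiv track=rewrite | github.com/Luckyaxah/leetcode-python | 动态规划_机器人walk.py | waysdp
-- ===== SOURCE A (Python) =====
-- def waysdp(N, start, K,end):
--     if N<2 or K<1 or start<1 or start>N or end<1 or end>N:
--         return 0
--     # （cur, rest) cur范围1～N，rest范围0～k
--     # 故缓存结构可以不需要使用hash表，可以使用二维数组。
--     dp = [[0 for j in range(K+1)] for i in range(N+1)]
--     dp[end][0] = 1
--     for col in range(1, K+1):
--         dp[1][col] = dp[2][col-1]
--         dp[N][col] = dp[N-1][col-1]
--         for row in range(2, N):
--             dp[row][col] = dp[row-1][col-1]+dp[row+1][col-1]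
--     return dp[start][K]
-- ===== SOURCE B (Python) =====
-- def waysdp(N, start, K, end):
--     if N<2 or K<1 or start<1 or start>N or end<1 or end>N:
--         return 0
--     # push-based sparse frontier: propagate walk counts FORWARD from start in a
--     # dictionary keyed by reachable positions only; the answer is read at end.
--     # Equal to A's backward dense-table count from end by walk reversal.
--     cnt = {start: 1}
--     for _ in range(K):
--         nxt = {}
--         for pos, c in cnt.items():
--             if pos > 1:
--                 nxt[pos-1] = nxt.get(pos-1, 0) + c
--             if pos < N:
--                 nxt[pos+1] = nxt.get(pos+1, 0) + c
--         cnt = nxt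
--     return cnt.get(end, 0)
-- ===== Notes on version B (the rewrite author's own statement) =====
-- stated objective: alternative
-- what changed: B replaces A's backward (N+1)x(K+1) DP table (seeded at end, filled bottom-up with special boundary rows, read at start) by a push-based sparse frontier dictionary propagated forward from start and read at end, equal by walk reversal; it keeps only the currently reachable positions instead of the full table.
import Mathlib
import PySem

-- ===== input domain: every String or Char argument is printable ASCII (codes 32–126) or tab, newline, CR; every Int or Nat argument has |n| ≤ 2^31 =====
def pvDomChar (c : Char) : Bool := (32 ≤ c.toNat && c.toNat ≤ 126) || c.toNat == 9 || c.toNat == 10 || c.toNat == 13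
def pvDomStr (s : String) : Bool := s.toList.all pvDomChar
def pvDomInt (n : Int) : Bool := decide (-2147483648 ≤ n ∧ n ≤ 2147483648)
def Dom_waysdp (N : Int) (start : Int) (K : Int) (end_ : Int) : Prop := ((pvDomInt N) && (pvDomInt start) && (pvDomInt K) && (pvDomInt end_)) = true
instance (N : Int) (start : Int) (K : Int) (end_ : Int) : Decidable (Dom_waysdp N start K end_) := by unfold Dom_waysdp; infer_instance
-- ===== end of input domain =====

-- B is a different algorithm: instead of A's backward dense (N+1)×(K+1) DP table (seeded at end,
-- read at start) it pushes walk counts FORWARD from start through a sparse frontier dictionary and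
-- reads the answer at end — equal by walk reversal; same return value on every input.

-- ===== PORT A =====
-- dp[i][j] (indices are in range at every use in this port, so the default is never taken; exact there)
def pvGet2 (dp : List (List Int)) (i j : Int) : Int :=
  PySem.List.pyGetD (PySem.List.pyGetD dp i []) j 0

-- dp[i][j] = v (indices are in range at every use in this port; exact there)
def pvSet2 (dp : List (List Int)) (i j : Int) (v : Int) : List (List Int) :=
  PySem.List.pySetD dp i (PySem.List.pySetD (PySem.List.pyGetD dp i []) j v)

def waysdp (N : Int) (start : Int) (K : Int) (end_ : Int) : Int :=
  if N < 2 ∨ K < 1 ∨ start < 1 ∨ start > N ∨ end_ < 1 ∨ end_ > N then 0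
  else
    let dp : List (List Int) :=
      (PySem.List.pyRange 0 (N+1) 1).map
        (fun _ => (PySem.List.pyRange 0 (K+1) 1).map (fun _ => (0:Int)))
    let dp := pvSet2 dp end_ 0 1
    let dp := (PySem.List.pyRange 1 (K+1) 1).foldl (fun dp col =>
      let dp := pvSet2 dp 1 col (pvGet2 dp 2 (col-1))
      let dp := pvSet2 dp N col (pvGet2 dp (N-1) (col-1))
      (PySem.List.pyRange 2 N 1).foldl (fun dp row =>
        pvSet2 dp row col (pvGet2 dp (row-1) (col-1) + pvGet2 dp (row+1) (col-1))) dp) dp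
    pvGet2 dp start K

-- ===== PORT B =====
-- one step of the frontier loop: the 'for pos, c in cnt.items()' body of Source B
def bstep (N : Int) (cnt : PySem.Dict Int Int) : PySem.Dict Int Int :=
  cnt.items.foldl (fun nxt pc =>
    let nxt := if pc.1 > 1 then nxt.insert (pc.1 - 1) (nxt.getD (pc.1 - 1) 0 + pc.2) else nxt
    if pc.1 < N then nxt.insert (pc.1 + 1) (nxt.getD (pc.1 + 1) 0 + pc.2) else nxt)
    PySem.Dict.empty

def waysdp_alt (N : Int) (start : Int) (K : Int) (end_ : Int) : Int :=
  if N < 2 ∨ K < 1 ∨ start < 1 ∨ start > N ∨ end_ < 1 ∨ end_ > N then 0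
  else
    ((PySem.List.pyRange 0 K 1).foldl (fun cnt _ => bstep N cnt)
      (PySem.Dict.ofList [(start, 1)])).getD end_ 0

-- ===== PRECONDITION & SPEC =====
def Spec_waysdp (N : Int) (start : Int) (K : Int) (end_ : Int) (out : Int) : Prop := out = waysdp_alt N start K end_
instance (N : Int) (start : Int) (K : Int) (end_ : Int) (out : Int) : Decidable (Spec_waysdp N start K end_ out) := by unfold Spec_waysdp; infer_instance

-- ===== CLAIM (what is proved, stated in full; the proofs are below) =====
def Claim_equal_waysdp : Prop := ∀ (N : Int) (start : Int) (K : Int) (end_ : Int), Dom_waysdp N start K end_ → Spec_waysdp N start K end_ (waysdp N start K end_)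

-- ===== LEMMAS AND PROOFS =====

-- the recurrence A computes: pvH N end_ c r = number of length-c walks in [1,N] from r to end_
def pvH (N end_ : Int) : Nat → Int → Int
  | 0, r => if r = end_ then 1 else 0
  | c+1, r => if 1 ≤ r ∧ r ≤ N then pvH N end_ c (r-1) + pvH N end_ c (r+1) else 0

lemma pvH_zero {N end_ : Int} (he : 1 ≤ end_) (c : Nat) : pvH N end_ c 0 = 0 := by
  cases c with
  | zero => rw [pvH, if_neg (by omega)]
  | succ m => rw [pvH, if_neg (by omega)]

lemma pvH_big {N end_ : Int} (he : end_ ≤ N) (c : Nat) {r : Int} (hr : N < r) : pvH N end_ c r = 0 := by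
  cases c with
  | zero => rw [pvH, if_neg (by omega)]
  | succ m => rw [pvH, if_neg (by omega)]

-- fold over a unit-step range with an invariant indexed by the loop counter
lemma foldl_range_inv {α : Type} (f : α → Int → α) (P : Int → α → Prop) :
    ∀ (n : Nat) (a : Int) (x : α), (∀ c y, a ≤ c → c < a + n → P c y → P (c+1) (f y c)) →
      P a x → P (a + n) ((PySem.List.pyRange a (a + n) 1).foldl f x) := by
  intro n
  induction n with
  | zero => intro a x _ hx; simpa [PySem.List.pyRange_one_eq_nil] using hx
  | succ m ih =>
    intro a x hstep hx
    have hcast : a + ((m+1 : Nat) : Int) = (a+1) + (m : Int) := by push_cast; ring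
    rw [hcast, PySem.List.pyRange_one_cons (by omega)]
    simp only [List.foldl_cons]
    have h1 : P (a+1) (f x a) := hstep a x le_rfl (by push_cast; omega) hx
    exact ih (a+1) (f x a) (fun c y hc hc' => hstep c y (by omega) (by push_cast at hc' ⊢; omega)) h1

-- in-range characterisations of the 2-D helpers
lemma pvGet2_eq (dp : List (List Int)) (i j : Int) (hi0 : 0 ≤ i) (hi : i.toNat < dp.length)
    (hj0 : 0 ≤ j) (hj : j.toNat < (dp[i.toNat]).length) :
    pvGet2 dp i j = dp[i.toNat][j.toNat] := by
  unfold pvGet2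
  rw [PySem.List.pyGetD_eq_getElem dp [] hi0 (by omega),
      PySem.List.pyGetD_eq_getElem _ 0 hj0 (by omega)]

lemma pvSet2_eq (dp : List (List Int)) (i j : Int) (v : Int) (hi0 : 0 ≤ i) (hi : i.toNat < dp.length)
    (hj0 : 0 ≤ j) :
    pvSet2 dp i j v = dp.set i.toNat (dp[i.toNat].set j.toNat v) := by
  unfold pvSet2
  rw [PySem.List.pyGetD_eq_getElem dp [] hi0 (by omega),
      PySem.List.pySetD_of_nonneg _ _ hj0, PySem.List.pySetD_of_nonneg _ _ hi0]

-- table invariant: dp is an (N+1)×(K+1) table whose (r,j) entry is g r j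
def TInv (N K : Int) (g : Nat → Nat → Int) (dp : List (List Int)) : Prop :=
  dp.length = (N+1).toNat ∧
  ∀ (r : Nat) (hr : r < dp.length),
    dp[r].length = (K+1).toNat ∧
    ∀ (j : Nat) (hj : j < dp[r].length), dp[r][j] = g r j

lemma TInv_read {N K : Int} {g : Nat → Nat → Int} {dp : List (List Int)} (h : TInv N K g dp)
    {i j : Int} (hi0 : 0 ≤ i) (hi : i ≤ N) (hj0 : 0 ≤ j) (hj : j ≤ K) :
    pvGet2 dp i j = g i.toNat j.toNat := by
  obtain ⟨hlen, hrow⟩ := h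
  have hi' : i.toNat < dp.length := by omega
  have hrl := (hrow i.toNat hi').1
  have hj' : j.toNat < (dp[i.toNat]).length := by omega
  rw [pvGet2_eq dp i j hi0 hi' hj0 hj']
  exact (hrow i.toNat hi').2 j.toNat hj'

lemma getElem_set2 (dp : List (List Int)) (a : Nat) (X : List Int) (r k : Nat)
    (hr : r < (dp.set a X).length) (hk : k < (dp.set a X)[r].length)
    (hkX : k < X.length) (hkd : k < (dp[r]'(by simpa using hr)).length) :
    (dp.set a X)[r][k] = if a = r then X[k] else (dp[r]'(by simpa using hr))[k] := by
  simp only [List.getElem_set]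
  by_cases h : a = r
  · simp [h]
  · simp [h]

lemma TInv_write {N K : Int} {g : Nat → Nat → Int} {dp : List (List Int)} (h : TInv N K g dp)
    {i j : Int} (v : Int) (hi0 : 0 ≤ i) (hi : i ≤ N) (hj0 : 0 ≤ j) (hj : j ≤ K) (hN : 0 ≤ N) :
    TInv N K (fun r k => if r = i.toNat ∧ k = j.toNat then v else g r k) (pvSet2 dp i j v) := by
  obtain ⟨hlen, hrow⟩ := h
  have hi' : i.toNat < dp.length := by omega
  have hrowlen := (hrow i.toNat hi').1
  rw [pvSet2_eq dp i j v hi0 hi' hj0]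
  have hXlen : (dp[i.toNat].set j.toNat v).length = (K+1).toNat := by
    simpa using hrowlen
  refine ⟨by simpa using hlen, ?_⟩
  intro r hr
  have hr' : r < dp.length := by simpa using hr
  have hrl : (dp.set i.toNat (dp[i.toNat].set j.toNat v))[r].length = (K+1).toNat := by
    rw [List.getElem_set]
    split
    · exact hXlen
    · exact (hrow r hr').1
  refine ⟨hrl, ?_⟩
  intro k hk
  have hkd : k < dp[r].length := by rw [(hrow r hr').1]; omega
  have hkX : k < (dp[i.toNat].set j.toNat v).length := by omega
  rw [getElem_set2 dp i.toNat (dp[i.toNat].set j.toNat v) r k hr hk hkX hkd]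
  by_cases hri : i.toNat = r
  · subst hri
    rw [if_pos rfl, List.getElem_set]
    split
    · next hjk => exact (if_pos ⟨rfl, hjk.symm⟩).symm
    · next hjk =>
      rw [(hrow i.toNat hr').2 k hkd]
      exact (if_neg (fun habs => hjk habs.2.symm)).symm
  · rw [if_neg hri, (hrow r hr').2 k hkd]
    exact (if_neg (fun habs => hri habs.1.symm)).symm

lemma TInv_congr {N K : Int} {g g' : Nat → Nat → Int} {dp : List (List Int)} (h : TInv N K g dp)
    (hgg : ∀ r k, r < (N+1).toNat → k < (K+1).toNat → g r k = g' r k) : TInv N K g' dp := by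
  obtain ⟨hlen, hrow⟩ := h
  refine ⟨hlen, fun r hr => ⟨(hrow r hr).1, fun j hj => ?_⟩⟩
  rw [(hrow r hr).2 j hj]
  exact hgg r j (by omega) (by rw [(hrow r hr).1] at hj; omega)

-- the A-side column invariant: columns ≤ c are filled with pvH, the rest is 0
def AvG (N K end_ : Int) (c : Int) : Nat → Nat → Int :=
  fun r j => if (j:Int) ≤ c then pvH N end_ j (r:Int) else 0

theorem waysdp_eq_pvH (N start K end_ : Int) (hN : 2 ≤ N) (hK : 1 ≤ K)
    (hs1 : 1 ≤ start) (hs2 : start ≤ N) (he1 : 1 ≤ end_) (he2 : end_ ≤ N) :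
    waysdp N start K end_ = pvH N end_ K.toNat start := by
  unfold waysdp
  rw [if_neg (by omega)]
  dsimp only
  -- initial zero table
  have hT0 : TInv N K (fun _ _ => 0)
      ((PySem.List.pyRange 0 (N+1) 1).map
        (fun _ => (PySem.List.pyRange 0 (K+1) 1).map (fun _ => (0:Int)))) := by
    refine ⟨by simp [PySem.List.length_pyRange_one], ?_⟩
    intro r hr
    constructor
    · simp [PySem.List.length_pyRange_one]
    · intro j hj; simp
  -- after dp[end][0] = 1
  have hD0 : TInv N K (AvG N K end_ 0)
      (pvSet2 ((PySem.List.pyRange 0 (N+1) 1).map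
        (fun _ => (PySem.List.pyRange 0 (K+1) 1).map (fun _ => (0:Int)))) end_ 0 1) := by
    refine TInv_congr (TInv_write hT0 1 (by omega) (by omega) le_rfl (by omega) (by omega)) ?_
    intro r k hr hk
    unfold AvG
    split
    · next hcond =>
      obtain ⟨h1, h2⟩ := hcond
      have hk0 : k = 0 := by omega
      subst hk0
      have : (r:Int) = end_ := by omega
      simp [pvH, this]
    · next hcond =>
      by_cases hk0 : (k:Int) ≤ 0
      · have hk0' : k = 0 := by omega
        subst hk0'
        have hre : (r:Int) ≠ end_ := by
          intro habs; exact hcond ⟨by omega, rfl⟩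
        simp [pvH, hre]
      · rw [if_neg hk0]
  -- the outer loop over columns
  have houter : ∀ c (dp : List (List Int)), 1 ≤ c → c < 1 + (K.toNat : Int) →
      TInv N K (AvG N K end_ (c-1)) dp →
      TInv N K (AvG N K end_ c)
        ((PySem.List.pyRange 2 N 1).foldl (fun dp row =>
            pvSet2 dp row c (pvGet2 dp (row-1) (c-1) + pvGet2 dp (row+1) (c-1)))
          (pvSet2 (pvSet2 dp 1 c (pvGet2 dp 2 (c-1))) N c
            (pvGet2 (pvSet2 dp 1 c (pvGet2 dp 2 (c-1))) (N-1) (c-1)))) := by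
    intro c dp hc1 hc2 hdp
    have hcK : c ≤ K := by omega
    have hcast : ((c-1).toNat : Int) = c - 1 := by omega
    have hsucc : c.toNat = (c-1).toNat + 1 := by omega
    have hv1 : pvGet2 dp 2 (c-1) = pvH N end_ (c-1).toNat 2 := by
      rw [TInv_read hdp (by omega) (by omega) (by omega) (by omega)]
      unfold AvG
      rw [if_pos (by omega)]
      congr 1 <;> omega
    have hD1 := TInv_write hdp (pvGet2 dp 2 (c-1)) (i := 1) (j := c) (by omega) (by omega) (by omega) hcK (by omega)
    have hvN : pvGet2 (pvSet2 dp 1 c (pvGet2 dp 2 (c-1))) (N-1) (c-1) = pvH N end_ (c-1).toNat (N-1) := by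
      rw [TInv_read hD1 (by omega) (by omega) (by omega) (by omega)]
      rw [if_neg (by omega)]
      unfold AvG
      rw [if_pos (by omega)]
      congr 1 <;> omega
    have hD2 := TInv_write hD1 (pvGet2 (pvSet2 dp 1 c (pvGet2 dp 2 (c-1))) (N-1) (c-1))
      (i := N) (j := c) (by omega) le_rfl (by omega) hcK (by omega)
    have hinner : ∀ ρ (dpi : List (List Int)), 2 ≤ ρ → ρ < 2 + ((N-2).toNat : Int) →
        TInv N K (fun r k =>
          if (k:Int) ≤ c - 1 then pvH N end_ k (r:Int)
          else if (k:Int) = c ∧ ((r:Int) = 1 ∨ (r:Int) = N ∨ (2 ≤ (r:Int) ∧ (r:Int) < ρ)) then pvH N end_ k (r:Int)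
          else 0) dpi →
        TInv N K (fun r k =>
          if (k:Int) ≤ c - 1 then pvH N end_ k (r:Int)
          else if (k:Int) = c ∧ ((r:Int) = 1 ∨ (r:Int) = N ∨ (2 ≤ (r:Int) ∧ (r:Int) < ρ+1)) then pvH N end_ k (r:Int)
          else 0)
        (pvSet2 dpi ρ c (pvGet2 dpi (ρ-1) (c-1) + pvGet2 dpi (ρ+1) (c-1))) := by
      intro ρ dpi hρ1 hρ2 hdpi
      have hρN : ρ < N := by omega
      have hr1 : pvGet2 dpi (ρ-1) (c-1) = pvH N end_ (c-1).toNat (ρ-1) := by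
        rw [TInv_read hdpi (by omega) (by omega) (by omega) (by omega), if_pos (by omega)]
        congr 1 <;> omega
      have hr2 : pvGet2 dpi (ρ+1) (c-1) = pvH N end_ (c-1).toNat (ρ+1) := by
        rw [TInv_read hdpi (by omega) (by omega) (by omega) (by omega), if_pos (by omega)]
        congr 1 <;> omega
      have hw := TInv_write hdpi (pvGet2 dpi (ρ-1) (c-1) + pvGet2 dpi (ρ+1) (c-1))
        (i := ρ) (j := c) (by omega) (by omega) (by omega) hcK (by omega)
      refine TInv_congr hw ?_
      intro r k hr hk
      rw [hr1, hr2]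
      by_cases hcell : r = ρ.toNat ∧ k = c.toNat
      · obtain ⟨hrr, hkk⟩ := hcell
        rw [if_pos ⟨hrr, hkk⟩, if_neg (by omega), if_pos ⟨by omega, Or.inr (Or.inr ⟨by omega, by omega⟩)⟩]
        have hρcast : (r : Int) = ρ := by omega
        rw [hρcast, hkk, hsucc]
        show pvH N end_ (c-1).toNat (ρ-1) + pvH N end_ (c-1).toNat (ρ+1) = pvH N end_ ((c-1).toNat+1) ρ
        rw [pvH]
        rw [if_pos (by constructor <;> omega)]
      · rw [if_neg hcell]
        split
        · next h1 => rfl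
        · next h1 =>
          split
          · next h2 =>
            rw [if_pos ⟨h2.1, by rcases h2.2 with h | h | h
                                 · exact Or.inl h
                                 · exact Or.inr (Or.inl h)
                                 · refine Or.inr (Or.inr ⟨h.1, ?_⟩)
                                   have : ¬ ((r:Int) = ρ ∧ (k:Int) = c) := by
                                     intro habs; exact hcell ⟨by omega, by omega⟩
                                   omega⟩]
          · next h2 =>
            rw [if_neg ?_]
            intro habs
            rcases habs.2 with h | h | h
            · exact h2 ⟨habs.1, Or.inl h⟩
            · exact h2 ⟨habs.1, Or.inr (Or.inl h)⟩
            · by_cases hlast : (r:Int) = ρ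
              · exact hcell ⟨by omega, by omega⟩
              · exact h2 ⟨habs.1, Or.inr (Or.inr ⟨h.1, by omega⟩)⟩
    have hstart : TInv N K (fun r k =>
        if (k:Int) ≤ c - 1 then pvH N end_ k (r:Int)
        else if (k:Int) = c ∧ ((r:Int) = 1 ∨ (r:Int) = N ∨ (2 ≤ (r:Int) ∧ (r:Int) < 2)) then pvH N end_ k (r:Int)
        else 0)
        (pvSet2 (pvSet2 dp 1 c (pvGet2 dp 2 (c-1))) N c
          (pvGet2 (pvSet2 dp 1 c (pvGet2 dp 2 (c-1))) (N-1) (c-1))) := by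
      refine TInv_congr hD2 ?_
      intro r k hr hk
      rw [hvN, hv1]
      unfold AvG
      split
      · next h1 =>
        obtain ⟨hrr, hkk⟩ := h1
        rw [if_neg (by omega), if_pos ⟨by omega, Or.inr (Or.inl (by omega))⟩]
        have : (r:Int) = N := by omega
        rw [this, hkk, hsucc]
        show pvH N end_ (c-1).toNat (N-1) = pvH N end_ ((c-1).toNat+1) N
        rw [pvH, if_pos (by constructor <;> omega), pvH_big he2 (c-1).toNat (r := N+1) (by omega)]
        ring
      · next h1 =>
        split
        · next h2 =>
          obtain ⟨hrr, hkk⟩ := h2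
          rw [if_neg (by omega), if_pos ⟨by omega, Or.inl (by omega)⟩]
          rw [hrr, hkk, hsucc]
          show pvH N end_ (c-1).toNat 2 = pvH N end_ ((c-1).toNat+1) 1
          rw [pvH, if_pos (by constructor <;> omega)]
          have e0 : (1:Int) - 1 = 0 := by ring
          have e2 : (1:Int) + 1 = 2 := by ring
          rw [e0, e2, pvH_zero he1]
          ring
        · next h2 =>
          split
          · next h3 => rfl
          · next h3 =>
            rw [if_neg ?_]
            intro habs
            rcases habs.2 with h | h | h
            · exact h2 ⟨by omega, by omega⟩
            · exact h1 ⟨by omega, by omega⟩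
            · omega
    have hNsplit : N = 2 + ((N-2).toNat : Int) := by omega
    have hfold := foldl_range_inv
      (f := fun dp row => pvSet2 dp row c (pvGet2 dp (row-1) (c-1) + pvGet2 dp (row+1) (c-1)))
      (P := fun ρ dpi => TInv N K (fun r k =>
          if (k:Int) ≤ c - 1 then pvH N end_ k (r:Int)
          else if (k:Int) = c ∧ ((r:Int) = 1 ∨ (r:Int) = N ∨ (2 ≤ (r:Int) ∧ (r:Int) < ρ)) then pvH N end_ k (r:Int)
          else 0) dpi)
      (N-2).toNat 2 _ (fun ρ dpi h1 h2 h3 => hinner ρ dpi h1 h2 h3) hstart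
    rw [← hNsplit] at hfold
    refine TInv_congr hfold ?_
    intro r k hr hk
    unfold AvG
    split
    · next h1 =>
      rw [if_pos (by omega)]
    · next h1 =>
      split
      · next h2 =>
        rw [if_pos (by omega)]
      · next h2 =>
        by_cases hkc : (k:Int) ≤ c
        · have hkk : (k:Int) = c := by omega
          have hr0 : (r:Int) = 0 := by
            by_contra habs
            exact h2 ⟨hkk, by omega⟩
          rw [if_pos hkc, hr0, pvH_zero he1]
        · rw [if_neg hkc]
  have hKsplit : K + 1 = 1 + ((K.toNat : Int)) := by omega
  have h10 : (1:Int) - 1 = 0 := by ring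
  have hfold := foldl_range_inv
    (f := fun dp col =>
      (PySem.List.pyRange 2 N 1).foldl (fun dp row =>
          pvSet2 dp row col (pvGet2 dp (row-1) (col-1) + pvGet2 dp (row+1) (col-1)))
        (pvSet2 (pvSet2 dp 1 col (pvGet2 dp 2 (col-1))) N col
          (pvGet2 (pvSet2 dp 1 col (pvGet2 dp 2 (col-1))) (N-1) (col-1))))
    (P := fun c dpi => TInv N K (AvG N K end_ (c-1)) dpi)
    K.toNat 1
    (pvSet2 ((PySem.List.pyRange 0 (N+1) 1).map
      (fun _ => (PySem.List.pyRange 0 (K+1) 1).map (fun _ => (0:Int)))) end_ 0 1)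
    (fun c y h1 h2 h3 => by
      have hres := houter c y h1 h2 h3
      have hcc : c + 1 - 1 = c := by ring
      show TInv N K (AvG N K end_ (c + 1 - 1)) _
      rw [hcc]
      exact hres)
    (by show TInv N K (AvG N K end_ ((1:Int) - 1)) _
        rw [h10]
        exact hD0)
  rw [← hKsplit] at hfold
  have hK1 : K + 1 - 1 = K := by ring
  rw [hK1] at hfold
  rw [TInv_read hfold (by omega) (by omega) (by omega) le_rfl]
  unfold AvG
  rw [if_pos (by omega)]
  congr 1 <;> omega

-- ================= B-side lemmas =================

-- pvH vanishes at positions below the line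
lemma pvH_low {N end_ : Int} (he : 1 ≤ end_) (c : Nat) {r : Int} (hr : r < 1) : pvH N end_ c r = 0 := by
  cases c with
  | zero => rw [pvH, if_neg (by omega)]
  | succ m => rw [pvH, if_neg (by omega)]

-- the inner 'for pos, c in cnt.items()' fold, characterised through getD
lemma bstep_fold_getD (N : Int) (l : List (Int × Int)) (q : Int) :
    ∀ (d : PySem.Dict Int Int),
    (l.foldl (fun nxt pc =>
      let nxt := if pc.1 > 1 then nxt.insert (pc.1 - 1) (nxt.getD (pc.1 - 1) 0 + pc.2) else nxt
      if pc.1 < N then nxt.insert (pc.1 + 1) (nxt.getD (pc.1 + 1) 0 + pc.2) else nxt) d).getD q 0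
    = d.getD q 0 + (l.map (fun pc =>
        (if pc.1 > 1 ∧ pc.1 - 1 = q then pc.2 else 0) +
        (if pc.1 < N ∧ pc.1 + 1 = q then pc.2 else 0))).sum := by
  induction l with
  | nil => intro d; simp
  | cons pc t ih =>
    intro d
    simp only [List.foldl_cons, List.map_cons, List.sum_cons]
    rw [ih]
    have hone : (if pc.1 < N then
          (if pc.1 > 1 then d.insert (pc.1 - 1) (d.getD (pc.1 - 1) 0 + pc.2) else d).insert (pc.1 + 1)
            ((if pc.1 > 1 then d.insert (pc.1 - 1) (d.getD (pc.1 - 1) 0 + pc.2) else d).getD (pc.1 + 1) 0 + pc.2)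
        else (if pc.1 > 1 then d.insert (pc.1 - 1) (d.getD (pc.1 - 1) 0 + pc.2) else d)).getD q 0
        = d.getD q 0 + ((if pc.1 > 1 ∧ pc.1 - 1 = q then pc.2 else 0) +
            (if pc.1 < N ∧ pc.1 + 1 = q then pc.2 else 0)) := by
      have haux : ∀ (d : PySem.Dict Int Int) (k v : Int),
          (d.insert k (d.getD k 0 + v)).getD q 0 = d.getD q 0 + (if k = q then v else 0) := by
        intro d k v
        rw [PySem.Dict.getD_insert]
        by_cases h : q = k
        · subst h
          simp
        · rw [if_neg h, if_neg (fun hh => h hh.symm), add_zero]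
      by_cases h1 : pc.1 > 1 <;> by_cases h2 : pc.1 < N <;>
        simp only [h1, h2, if_true, if_false, ite_true, ite_false, false_and, true_and,
          iff_true, iff_false, haux] <;>
        first
          | (split_ifs <;> omega)
          | omega
    rw [hone]
    ring

-- summing the indicator pick over a dict's items is a lookup (keys are unique)
lemma sum_pick_zero (x : Int) (l : List (Int × Int)) (h : x ∉ l.map Prod.fst) :
    (l.map (fun pc => if pc.1 = x then pc.2 else 0)).sum = 0 := by
  induction l with
  | nil => simp
  | cons pc t ih =>
    simp only [List.map_cons, List.sum_cons]
    rw [if_neg (by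
      intro habs
      exact h (by simp [habs.symm])), ih (by
      intro habs
      exact h (by simp [habs]))]
    ring

lemma sum_pick_list (x : Int) : ∀ (l : List (Int × Int)), (l.map Prod.fst).Nodup →
    (l.map (fun pc => if pc.1 = x then pc.2 else 0)).sum = (PySem.Dict.mk l).getD x 0 := by
  intro l
  induction l with
  | nil => intro _; simp [PySem.Dict.getD_eq_get?_getD, PySem.Dict.get?]
  | cons pc t ih =>
    intro hnd
    simp only [List.map_cons, List.sum_cons]
    rw [PySem.Dict.getD_eq_get?_getD, PySem.Dict.get?_mk_cons]
    by_cases h : pc.1 = x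
    · rw [if_pos h, if_pos (by simpa using h)]
      rw [sum_pick_zero x t (by
        simp only [List.map_cons] at hnd
        intro habs
        exact (List.nodup_cons.mp hnd).1 (h ▸ habs))]
      simp
    · rw [if_neg h, if_neg (by simpa using h), zero_add, ← PySem.Dict.getD_eq_get?_getD]
      exact ih (by simp only [List.map_cons] at hnd; exact (List.nodup_cons.mp hnd).2)

lemma sum_pick (x : Int) (d : PySem.Dict Int Int) (h : d.keys.Nodup) :
    (d.items.map (fun pc => if pc.1 = x then pc.2 else 0)).sum = d.getD x 0 := by
  obtain ⟨l⟩ := d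
  exact sum_pick_list x l (by simpa [PySem.Dict.keys] using h)

-- keys stay unique through bstep
lemma nodup_bstep (N : Int) (cnt : PySem.Dict Int Int) : (bstep N cnt).keys.Nodup := by
  unfold bstep
  have haux : ∀ (l : List (Int × Int)) (d : PySem.Dict Int Int), d.keys.Nodup →
      (l.foldl (fun nxt pc =>
        let nxt := if pc.1 > 1 then nxt.insert (pc.1 - 1) (nxt.getD (pc.1 - 1) 0 + pc.2) else nxt
        if pc.1 < N then nxt.insert (pc.1 + 1) (nxt.getD (pc.1 + 1) 0 + pc.2) else nxt) d).keys.Nodup := by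
    intro l
    induction l with
    | nil => intro d hd; exact hd
    | cons pc t ih =>
      intro d hd
      simp only [List.foldl_cons]
      apply ih
      by_cases h1 : pc.1 > 1 <;> by_cases h2 : pc.1 < N <;>
        simp only [h1, h2, if_true, if_false] <;>
        first
          | exact PySem.Dict.nodup_keys_insert _ _ _ (PySem.Dict.nodup_keys_insert _ _ _ hd)
          | exact PySem.Dict.nodup_keys_insert _ _ _ hd
          | exact hd
  exact haux cnt.items PySem.Dict.empty (by simpa using PySem.Dict.nodup_keys_empty)

-- one frontier step computes the forward recurrence (which is pvH with base start)
lemma bstep_getD (N start : Int) (hN : 2 ≤ N) (hs1 : 1 ≤ start) (hs2 : start ≤ N) (c : Nat)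
    (cnt : PySem.Dict Int Int) (hnd : cnt.keys.Nodup)
    (hcnt : ∀ r, cnt.getD r 0 = pvH N start c r) (q : Int) :
    (bstep N cnt).getD q 0 = pvH N start (c+1) q := by
  unfold bstep
  rw [bstep_fold_getD N cnt.items q PySem.Dict.empty, PySem.Dict.getD_empty, zero_add]
  have hsplit : (cnt.items.map (fun pc =>
        (if pc.1 > 1 ∧ pc.1 - 1 = q then pc.2 else 0) +
        (if pc.1 < N ∧ pc.1 + 1 = q then pc.2 else 0))).sum
      = (cnt.items.map (fun pc => if pc.1 > 1 ∧ pc.1 - 1 = q then pc.2 else 0)).sum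
        + (cnt.items.map (fun pc => if pc.1 < N ∧ pc.1 + 1 = q then pc.2 else 0)).sum := by
    induction cnt.items with
    | nil => simp
    | cons pc t ih => simp only [List.map_cons, List.sum_cons]; rw [ih]; ring
  rw [hsplit]
  have hterm1 : (cnt.items.map (fun pc => if pc.1 > 1 ∧ pc.1 - 1 = q then pc.2 else 0)).sum
      = if 1 ≤ q then pvH N start c (q+1) else 0 := by
    by_cases hq : 1 ≤ q
    · have hfun : (fun pc : Int × Int => if pc.1 > 1 ∧ pc.1 - 1 = q then pc.2 else 0)
          = (fun pc : Int × Int => if pc.1 = q + 1 then pc.2 else 0) := by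
        funext pc
        split_ifs <;> omega
      rw [hfun, sum_pick (q+1) cnt hnd, hcnt (q+1), if_pos hq]
    · have hfun : ∀ pc ∈ cnt.items, (if pc.1 > 1 ∧ pc.1 - 1 = q then pc.2 else 0) = 0 := by
        intro pc _
        rw [if_neg (by omega)]
      rw [List.map_congr_left hfun, if_neg hq]
      simp
  have hterm2 : (cnt.items.map (fun pc => if pc.1 < N ∧ pc.1 + 1 = q then pc.2 else 0)).sum
      = if q ≤ N then pvH N start c (q-1) else 0 := by
    by_cases hq : q ≤ N
    · have hfun : (fun pc : Int × Int => if pc.1 < N ∧ pc.1 + 1 = q then pc.2 else 0)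
          = (fun pc : Int × Int => if pc.1 = q - 1 then pc.2 else 0) := by
        funext pc
        split_ifs <;> omega
      rw [hfun, sum_pick (q-1) cnt hnd, hcnt (q-1), if_pos hq]
    · have hfun : ∀ pc ∈ cnt.items, (if pc.1 < N ∧ pc.1 + 1 = q then pc.2 else 0) = 0 := by
        intro pc _
        rw [if_neg (by omega)]
      rw [List.map_congr_left hfun, if_neg hq]
      simp
  rw [hterm1, hterm2, pvH]
  by_cases h1 : 1 ≤ q <;> by_cases h2 : q ≤ N
  · rw [if_pos h1, if_pos h2, if_pos ⟨h1, h2⟩]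
    ring
  · rw [if_pos h1, if_neg h2, if_neg (fun h => h2 h.2),
        pvH_big hs2 c (r := q+1) (by omega)]
    ring
  · rw [if_neg h1, if_pos h2, if_neg (fun h => h1 h.1),
        pvH_low hs1 c (r := q-1) (by omega)]
    ring
  · rw [if_neg h1, if_neg h2, if_neg (fun h => h1 h.1)]
    ring

-- ===== walk-reversal symmetry =====

-- the bilinear bridge: counts a split walk, a steps from s and b steps to e
def pvS (N s e : Int) (a b : Nat) : Int :=
  ∑ r ∈ Finset.range N.toNat, pvH N s a ((r:Int)+1) * pvH N e b ((r:Int)+1)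

lemma sum_shift (h : Nat → Int) (n : Nat) (h0 : h 0 = 0) (hn : h n = 0) :
    ∑ r ∈ Finset.range n, h r = ∑ r ∈ Finset.range n, h (r+1) := by
  cases n with
  | zero => simp
  | succ m =>
    rw [Finset.sum_range_succ' h, Finset.sum_range_succ (fun r => h (r+1))]
    rw [h0, hn]

lemma pvS_exchange (N s e : Int) (hN : 2 ≤ N) (hs1 : 1 ≤ s) (hs2 : s ≤ N)
    (he1 : 1 ≤ e) (he2 : e ≤ N) (a b : Nat) :
    pvS N s e (a+1) b = pvS N s e a (b+1) := by
  have hNn : ((N.toNat : Nat) : Int) = N := by omega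
  unfold pvS
  have hL : ∀ r ∈ Finset.range N.toNat,
      pvH N s (a+1) ((r:Int)+1) * pvH N e b ((r:Int)+1)
      = pvH N s a (r:Int) * pvH N e b ((r:Int)+1) + pvH N s a ((r:Int)+2) * pvH N e b ((r:Int)+1) := by
    intro r hr
    have hrn : r < N.toNat := Finset.mem_range.mp hr
    rw [pvH, if_pos (by omega)]
    have e1 : (r:Int) + 1 - 1 = r := by ring
    have e2 : (r:Int) + 1 + 1 = (r:Int) + 2 := by ring
    rw [e1, e2, add_mul]
  have hR : ∀ r ∈ Finset.range N.toNat,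
      pvH N s a ((r:Int)+1) * pvH N e (b+1) ((r:Int)+1)
      = pvH N s a ((r:Int)+1) * pvH N e b (r:Int) + pvH N s a ((r:Int)+1) * pvH N e b ((r:Int)+2) := by
    intro r hr
    have hrn : r < N.toNat := Finset.mem_range.mp hr
    rw [pvH, if_pos (by omega)]
    have e1 : (r:Int) + 1 - 1 = r := by ring
    have e2 : (r:Int) + 1 + 1 = (r:Int) + 2 := by ring
    rw [e1, e2, mul_add]
  rw [Finset.sum_congr rfl hL, Finset.sum_congr rfl hR,
      Finset.sum_add_distrib, Finset.sum_add_distrib]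
  have hpair1 : ∑ r ∈ Finset.range N.toNat, pvH N s a (r:Int) * pvH N e b ((r:Int)+1)
      = ∑ r ∈ Finset.range N.toNat, pvH N s a ((r:Int)+1) * pvH N e b ((r:Int)+2) := by
    have := sum_shift (fun r => pvH N s a (r:Int) * pvH N e b ((r:Int)+1)) N.toNat
      (by show pvH N s a (((0:Nat):Int)) * pvH N e b (((0:Nat):Int)+1) = 0
          rw [show ((0:Nat):Int) = 0 by norm_num, pvH_zero hs1]
          ring)
      (by show pvH N s a ((N.toNat:Int)) * pvH N e b ((N.toNat:Int)+1) = 0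
          rw [pvH_big he2 b (r := ((N.toNat:Nat):Int)+1) (by omega)]
          ring)
    rw [this]
    refine Finset.sum_congr rfl (fun r _ => ?_)
    push_cast
    ring_nf
  have hpair2 : ∑ r ∈ Finset.range N.toNat, pvH N s a ((r:Int)+2) * pvH N e b ((r:Int)+1)
      = ∑ r ∈ Finset.range N.toNat, pvH N s a ((r:Int)+1) * pvH N e b (r:Int) := by
    have := sum_shift (fun r => pvH N s a ((r:Int)+1) * pvH N e b (r:Int)) N.toNat
      (by show pvH N s a (((0:Nat):Int)+1) * pvH N e b (((0:Nat):Int)) = 0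
          rw [show ((0:Nat):Int) = 0 by norm_num, pvH_zero he1]
          ring)
      (by show pvH N s a ((N.toNat:Int)+1) * pvH N e b ((N.toNat:Int)) = 0
          rw [pvH_big hs2 a (r := ((N.toNat:Nat):Int)+1) (by omega)]
          ring)
    rw [this]
    refine Finset.sum_congr rfl (fun r _ => ?_)
    push_cast
    ring_nf
  rw [hpair1, hpair2]
  ring

lemma pvS_slide (N s e : Int) (hN : 2 ≤ N) (hs1 : 1 ≤ s) (hs2 : s ≤ N)
    (he1 : 1 ≤ e) (he2 : e ≤ N) : ∀ (a b : Nat), pvS N s e a b = pvS N s e 0 (a+b) := by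
  intro a
  induction a with
  | zero => intro b; rw [Nat.zero_add]
  | succ m ih =>
    intro b
    rw [pvS_exchange N s e hN hs1 hs2 he1 he2 m b, ih (b+1)]
    congr 1
    omega

lemma pvS_right (N s e : Int) (hN : 2 ≤ N) (hs1 : 1 ≤ s) (hs2 : s ≤ N)
    (he1 : 1 ≤ e) (he2 : e ≤ N) (c : Nat) : pvS N s e c 0 = pvH N s c e := by
  unfold pvS
  have hpt : ∀ r ∈ Finset.range N.toNat,
      pvH N s c ((r:Int)+1) * pvH N e 0 ((r:Int)+1)
      = if r = (e-1).toNat then pvH N s c ((r:Int)+1) else 0 := by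
    intro r hr
    rw [pvH]
    by_cases h : (r:Int)+1 = e
    · rw [if_pos h, if_pos (by omega)]
      ring
    · rw [if_neg h, if_neg (by omega)]
      ring
  rw [Finset.sum_congr rfl hpt,
      Finset.sum_ite_eq' (Finset.range N.toNat) ((e-1).toNat) (fun r => pvH N s c ((r:Int)+1)),
      if_pos (Finset.mem_range.mpr (by omega))]
  congr 1
  omega

lemma pvS_left (N s e : Int) (hN : 2 ≤ N) (hs1 : 1 ≤ s) (hs2 : s ≤ N)
    (he1 : 1 ≤ e) (he2 : e ≤ N) (c : Nat) : pvS N s e 0 c = pvH N e c s := by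
  unfold pvS
  have hpt : ∀ r ∈ Finset.range N.toNat,
      pvH N s 0 ((r:Int)+1) * pvH N e c ((r:Int)+1)
      = if r = (s-1).toNat then pvH N e c ((r:Int)+1) else 0 := by
    intro r hr
    rw [pvH]
    by_cases h : (r:Int)+1 = s
    · rw [if_pos h, if_pos (by omega)]
      ring
    · rw [if_neg h, if_neg (by omega)]
      ring
  rw [Finset.sum_congr rfl hpt,
      Finset.sum_ite_eq' (Finset.range N.toNat) ((s-1).toNat) (fun r => pvH N e c ((r:Int)+1)),
      if_pos (Finset.mem_range.mpr (by omega))]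
  congr 1
  omega

-- a length-c walk from s to e reversed is one from e to s
lemma pvH_symm (N s e : Int) (hN : 2 ≤ N) (hs1 : 1 ≤ s) (hs2 : s ≤ N)
    (he1 : 1 ≤ e) (he2 : e ≤ N) (c : Nat) : pvH N s c e = pvH N e c s := by
  rw [← pvS_right N s e hN hs1 hs2 he1 he2 c,
      pvS_slide N s e hN hs1 hs2 he1 he2 c 0,
      pvS_left N s e hN hs1 hs2 he1 he2 (c+0), Nat.add_zero]

theorem waysdp_alt_eq_pvH (N start K end_ : Int) (hN : 2 ≤ N) (hK : 1 ≤ K)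
    (hs1 : 1 ≤ start) (hs2 : start ≤ N) (he1 : 1 ≤ end_) (he2 : end_ ≤ N) :
    waysdp_alt N start K end_ = pvH N start K.toNat end_ := by
  unfold waysdp_alt
  rw [if_neg (by omega)]
  have hinit_nd : (PySem.Dict.ofList [(start, (1:Int))]).keys.Nodup :=
    PySem.Dict.nodup_keys_ofList _
  have hinit : ∀ r, (PySem.Dict.ofList [(start, (1:Int))]).getD r 0 = pvH N start 0 r := by
    intro r
    rw [pvH, PySem.Dict.getD_eq_get?_getD,
        show PySem.Dict.ofList [(start, (1:Int))] = PySem.Dict.mk [(start,1)] from rfl,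
        PySem.Dict.get?_mk_cons]
    by_cases h : r = start
    · simp [h]
    · simp [h, Ne.symm h, PySem.Dict.get?]
  have hfold := foldl_range_inv (f := fun cnt (_ : Int) => bstep N cnt)
    (P := fun c cnt => cnt.keys.Nodup ∧ ∀ r, cnt.getD r 0 = pvH N start c.toNat r)
    K.toNat 0 (PySem.Dict.ofList [(start, 1)])
    (fun c cnt hc hc' hP => ⟨nodup_bstep N cnt, fun r => by
      have h1 : (c+1).toNat = c.toNat + 1 := by omega
      rw [h1]
      exact bstep_getD N start hN hs1 hs2 c.toNat cnt hP.1 hP.2 r⟩)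
    ⟨hinit_nd, hinit⟩
  rw [show (0:Int) + (K.toNat : Int) = K by omega] at hfold
  exact hfold.2 end_

-- ===== VERDICT (by name: the statement is the Claim_ definition above) =====
theorem waysdp_spec : Claim_equal_waysdp := by
  intro N start K end_ _
  unfold Spec_waysdp
  by_cases hg : N < 2 ∨ K < 1 ∨ start < 1 ∨ start > N ∨ end_ < 1 ∨ end_ > N
  · unfold waysdp waysdp_alt
    rw [if_pos hg, if_pos hg]
  · push_neg at hg
    obtain ⟨h1, h2, h3, h4, h5, h6⟩ := hg
    rw [waysdp_eq_pvH N start K end_ (by omega) (by omega) h3 (by omega) (by omega) h6,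
        waysdp_alt_eq_pvH N start K end_ (by omega) (by omega) h3 (by omega) (by omega) h6]
    exact pvH_symm N end_ start (by omega) (by omega) h6 h3 (by omega) K.toNat
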